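-- pv_equiv track=rewrite | github.com/20Bubba20/Painful-Prep | back-end/line_finder.py | get_four_intersections
-- ===== SOURCE A (Python) =====
-- def get_four_intersections(intersections, image_shape):
--     if len(intersections) < 4:
--         return None
--
--     height, width = image_shape[:2]
--     cx, cy = width // 2, height // 2
--
--     quadrants = {
--         "tl": [],
--         "tr": [],
--         "br": [],
--         "bl": []
--     }
--
--     for x, y in intersections:
--         if x < cx and y < cy:
--             quadrants["tl"].append((x, y))
--         elif x >= cx and y < cy:
--             quadrants["tr"].append((x, y))
--         elif x >= cx and y >= cy:
--             quadrants["br"].append((x, y))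
--         elif x < cx and y >= cy:
--             quadrants["bl"].append((x, y))
--
--     selected_points = []
--     for key in ["tl", "tr", "br", "bl"]:
--         points = quadrants[key]
--         if not points:
--             return None
--         # Pick the one closest to center
--         closest = min(points, key=lambda p: (p[0] - cx)**2 + (p[1] - cy)**2)
--         selected_points.append(closest)
--
--     return selected_points  # In order: TL, TR, BR, BL
-- ===== SOURCE B (Python) =====
-- def get_four_intersections(intersections, image_shape):
--     if len(intersections) < 4:
--         return None
--
--     height, width = image_shape[:2]
--     cx, cy = width // 2, height // 2
--
--     # One slot per quadrant in TL, TR, BR, BL order: (point, squared_distance)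
--     slots = [None, None, None, None]
--     for x, y in intersections:
--         if y < cy:
--             idx = 0 if x < cx else 1
--         else:
--             idx = 3 if x < cx else 2
--         d = (x - cx) ** 2 + (y - cy) ** 2
--         best = slots[idx]
--         if best is None or d < best[1]:
--             slots[idx] = ((x, y), d)
--
--     if any(s is None for s in slots):
--         return None
--     return [s[0] for s in slots]
-- ===== Notes on version B (the rewrite author's own statement) =====
-- stated objective: alternative
-- what changed: Replaced A's two-phase approach (bucket points into four quadrant lists, then a separate min-by-distance pass over each list) by a single pass that keeps one best (point, squared-distance) slot per quadrant, overwriting only on strictly smaller distance to reproduce min's first-wins tie rule.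
import Mathlib
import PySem

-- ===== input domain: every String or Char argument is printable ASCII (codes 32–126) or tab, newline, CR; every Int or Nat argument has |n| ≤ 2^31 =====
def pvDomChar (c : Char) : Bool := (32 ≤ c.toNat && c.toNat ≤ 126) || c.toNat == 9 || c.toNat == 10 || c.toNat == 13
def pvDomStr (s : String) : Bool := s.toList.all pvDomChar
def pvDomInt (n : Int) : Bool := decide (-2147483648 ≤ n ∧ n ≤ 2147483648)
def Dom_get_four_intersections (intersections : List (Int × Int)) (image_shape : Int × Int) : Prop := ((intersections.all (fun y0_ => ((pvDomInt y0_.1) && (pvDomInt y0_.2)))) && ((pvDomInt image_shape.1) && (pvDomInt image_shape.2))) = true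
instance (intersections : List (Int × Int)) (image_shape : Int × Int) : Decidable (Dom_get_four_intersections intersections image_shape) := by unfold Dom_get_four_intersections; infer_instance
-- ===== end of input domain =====

-- B replaces A's four quadrant lists + per-list min pass by a single pass keeping one
-- best (point, squared distance) slot per quadrant (objective: alternative; same O(n)).

-- ===== PORT A =====
-- A's quadrant-bucketing loop: append (x,y) to the matching quadrant list (tl, tr, br, bl).
def pvQStep (cx cy : Int)
    (q : List (Int × Int) × List (Int × Int) × List (Int × Int) × List (Int × Int))
    (p : Int × Int) :
    List (Int × Int) × List (Int × Int) × List (Int × Int) × List (Int × Int) :=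
  if p.1 < cx ∧ p.2 < cy then (q.1 ++ [p], q.2.1, q.2.2.1, q.2.2.2)
  else if p.1 ≥ cx ∧ p.2 < cy then (q.1, q.2.1 ++ [p], q.2.2.1, q.2.2.2)
  else if p.1 ≥ cx ∧ p.2 ≥ cy then (q.1, q.2.1, q.2.2.1 ++ [p], q.2.2.2)
  else if p.1 < cx ∧ p.2 ≥ cy then (q.1, q.2.1, q.2.2.1, q.2.2.2 ++ [p])
  else q

def get_four_intersections (intersections : List (Int × Int)) (image_shape : Int × Int) :
    Option (List (Int × Int)) :=
  if intersections.length < 4 then none else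
  let height := image_shape.1
  let width := image_shape.2
  let cx := PySem.Int.floordiv width 2
  let cy := PySem.Int.floordiv height 2
  let q := intersections.foldl (pvQStep cx cy) ([], [], [], [])
  let key : Int × Int → Int := fun p => (p.1 - cx) ^ 2 + (p.2 - cy) ^ 2
  -- the key loop: for each quadrant in order, return None if empty, else min by key
  match PySem.List.min? q.1 key, PySem.List.min? q.2.1 key,
        PySem.List.min? q.2.2.1 key, PySem.List.min? q.2.2.2 key with
  | some a, some b, some c, some d => some [a, b, c, d]
  | _, _, _, _ => none

-- ===== PORT B =====
-- B's quadrant index: 0 = TL, 1 = TR, 2 = BR, 3 = BL.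
def pvQIdx (cx cy x y : Int) : Nat :=
  if y < cy then (if x < cx then 0 else 1) else (if x < cx then 3 else 2)

-- B's slot update: overwrite only when empty or strictly closer.
def pvSlotUpd (p : Int × Int) (d : Int) (best : Option ((Int × Int) × Int)) :
    Option ((Int × Int) × Int) :=
  match best with
  | none => some (p, d)
  | some (m, bd) => if d < bd then some (p, d) else some (m, bd)

def pvSlotStep (cx cy : Int)
    (s : Option ((Int × Int) × Int) × Option ((Int × Int) × Int) ×
         Option ((Int × Int) × Int) × Option ((Int × Int) × Int))
    (p : Int × Int) :
    Option ((Int × Int) × Int) × Option ((Int × Int) × Int) ×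
    Option ((Int × Int) × Int) × Option ((Int × Int) × Int) :=
  let d := (p.1 - cx) ^ 2 + (p.2 - cy) ^ 2
  let idx := pvQIdx cx cy p.1 p.2
  if idx = 0 then (pvSlotUpd p d s.1, s.2.1, s.2.2.1, s.2.2.2)
  else if idx = 1 then (s.1, pvSlotUpd p d s.2.1, s.2.2.1, s.2.2.2)
  else if idx = 2 then (s.1, s.2.1, pvSlotUpd p d s.2.2.1, s.2.2.2)
  else (s.1, s.2.1, s.2.2.1, pvSlotUpd p d s.2.2.2)

-- B's final step: None if any slot is empty, else the four slot points in order.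
def pvCollect (s : Option ((Int × Int) × Int) × Option ((Int × Int) × Int) ×
    Option ((Int × Int) × Int) × Option ((Int × Int) × Int)) : Option (List (Int × Int)) :=
  match s.1 with
  | none => none
  | some a =>
    match s.2.1 with
    | none => none
    | some b =>
      match s.2.2.1 with
      | none => none
      | some c =>
        match s.2.2.2 with
        | none => none
        | some d => some [a.1, b.1, c.1, d.1]

def get_four_intersections_alt (intersections : List (Int × Int)) (image_shape : Int × Int) :
    Option (List (Int × Int)) :=
  if intersections.length < 4 then none else
  let height := image_shape.1
  let width := image_shape.2
  let cx := PySem.Int.floordiv width 2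
  let cy := PySem.Int.floordiv height 2
  pvCollect (intersections.foldl (pvSlotStep cx cy) (none, none, none, none))

-- ===== PRECONDITION & SPEC =====
def Spec_get_four_intersections (intersections : List (Int × Int)) (image_shape : Int × Int) (out : Option (List (Int × Int))) : Prop := out = get_four_intersections_alt intersections image_shape
instance (intersections : List (Int × Int)) (image_shape : Int × Int) (out : Option (List (Int × Int))) : Decidable (Spec_get_four_intersections intersections image_shape out) := by unfold Spec_get_four_intersections; infer_instance

-- ===== CLAIM (what is proved, stated in full; the proofs are below) =====
def Claim_equal_get_four_intersections : Prop := ∀ (intersections : List (Int × Int)) (image_shape : Int × Int), Dom_get_four_intersections intersections image_shape → Spec_get_four_intersections intersections image_shape (get_four_intersections intersections image_shape)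

-- ===== LEMMAS AND PROOFS =====

-- min?'s fold step, with a skip for elements outside the quadrant
def pvMStep (key : Int × Int → Int) (acc : Option (Int × Int)) (x : Int × Int) :
    Option (Int × Int) :=
  match acc with
  | none => some x
  | some m => if key x < key m then some x else some m

def pvEmb (key : Int × Int → Int) : Option (Int × Int) → Option ((Int × Int) × Int) :=
  Option.map (fun m => (m, key m))

lemma pvSlotUpd_emb (key : Int × Int → Int) (p : Int × Int) (a : Option (Int × Int)) :
    pvSlotUpd p (key p) (pvEmb key a) = pvEmb key (pvMStep key a p) := by
  cases a with
  | none => rfl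
  | some m =>
    simp only [pvEmb, pvSlotUpd, pvMStep, Option.map_some]
    split_ifs <;> rfl

-- the four quadrant predicates, for cx cy
def pvP1 (cx cy : Int) (p : Int × Int) : Bool := p.1 < cx && p.2 < cy
def pvP2 (cx cy : Int) (p : Int × Int) : Bool := cx ≤ p.1 && p.2 < cy
def pvP3 (cx cy : Int) (p : Int × Int) : Bool := cx ≤ p.1 && cy ≤ p.2
def pvP4 (cx cy : Int) (p : Int × Int) : Bool := p.1 < cx && cy ≤ p.2

-- A's bucketing fold computes (acc ++ filter) for each quadrant
lemma pvQFold (cx cy : Int) (xs : List (Int × Int))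
    (l1 l2 l3 l4 : List (Int × Int)) :
    xs.foldl (pvQStep cx cy) (l1, l2, l3, l4) =
      (l1 ++ xs.filter (pvP1 cx cy), l2 ++ xs.filter (pvP2 cx cy),
       l3 ++ xs.filter (pvP3 cx cy), l4 ++ xs.filter (pvP4 cx cy)) := by
  induction xs generalizing l1 l2 l3 l4 with
  | nil => simp
  | cons x t ih =>
    simp only [List.foldl_cons, List.filter_cons]
    by_cases hx : x.1 < cx <;> by_cases hy : x.2 < cy
    · simp [pvQStep, pvP1, pvP2, pvP3, pvP4, hx, hy, not_le.mpr hx, not_le.mpr hy, ih]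
    · simp [pvQStep, pvP1, pvP2, pvP3, pvP4, hx, hy, not_le.mpr hx, not_lt.mp hy, ih]
    · simp [pvQStep, pvP1, pvP2, pvP3, pvP4, hx, hy, not_lt.mp hx, not_le.mpr hy, ih]
    · simp [pvQStep, pvP1, pvP2, pvP3, pvP4, hx, hy, not_lt.mp hx, not_lt.mp hy, ih]

-- B's slot fold equals, per quadrant, the min?-fold over the filtered list
lemma pvSFold (cx cy : Int) (xs : List (Int × Int))
    (key : Int × Int → Int) (hkey : key = fun p => (p.1 - cx) ^ 2 + (p.2 - cy) ^ 2)
    (a1 a2 a3 a4 : Option (Int × Int)) :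
    xs.foldl (pvSlotStep cx cy) (pvEmb key a1, pvEmb key a2, pvEmb key a3, pvEmb key a4) =
      (pvEmb key ((xs.filter (pvP1 cx cy)).foldl (pvMStep key) a1),
       pvEmb key ((xs.filter (pvP2 cx cy)).foldl (pvMStep key) a2),
       pvEmb key ((xs.filter (pvP3 cx cy)).foldl (pvMStep key) a3),
       pvEmb key ((xs.filter (pvP4 cx cy)).foldl (pvMStep key) a4)) := by
  induction xs generalizing a1 a2 a3 a4 with
  | nil => simp
  | cons x t ih =>
    have hd : (x.1 - cx) ^ 2 + (x.2 - cy) ^ 2 = key x := by rw [hkey]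
    simp only [List.foldl_cons, List.filter_cons, pvSlotStep, pvQIdx]
    by_cases hx : x.1 < cx <;> by_cases hy : x.2 < cy <;>
      simp only [hx, hy, if_true, if_false, hd, pvSlotUpd_emb]
    · simp [pvP1, pvP2, pvP3, pvP4, hx, hy, not_le.mpr hx, not_le.mpr hy, ih]
    · simp [pvP1, pvP2, pvP3, pvP4, hx, hy, not_le.mpr hx, not_lt.mp hy, ih]
    · simp [pvP1, pvP2, pvP3, pvP4, hx, hy, not_lt.mp hx, not_le.mpr hy, ih]
    · simp [pvP1, pvP2, pvP3, pvP4, hx, hy, not_lt.mp hx, not_lt.mp hy, ih]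

lemma pvMin?_eq_fold (key : Int × Int → Int) (xs : List (Int × Int)) :
    PySem.List.min? xs key = xs.foldl (pvMStep key) none := by
  unfold PySem.List.min?
  congr 1
  funext acc x
  cases acc <;> rfl

-- ===== VERDICT (by name: the statement is the Claim_ definition above) =====
theorem get_four_intersections_spec : Claim_equal_get_four_intersections := by
  intro xs shape _
  unfold Spec_get_four_intersections
  unfold get_four_intersections get_four_intersections_alt
  by_cases hlen : xs.length < 4
  · simp [hlen]
  · simp only [hlen, if_false]
    set cx := PySem.Int.floordiv shape.2 2 with hcx
    set cy := PySem.Int.floordiv shape.1 2 with hcy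
    set key : Int × Int → Int := fun p => (p.1 - cx) ^ 2 + (p.2 - cy) ^ 2 with hkey
    have hq := pvQFold cx cy xs [] [] [] []
    have hs := pvSFold cx cy xs key hkey none none none none
    simp only [pvEmb, Option.map_none] at hs
    rw [hq, hs]
    simp only [List.nil_append, pvMin?_eq_fold]
    set m1 := (xs.filter (pvP1 cx cy)).foldl (pvMStep key) none
    set m2 := (xs.filter (pvP2 cx cy)).foldl (pvMStep key) none
    set m3 := (xs.filter (pvP3 cx cy)).foldl (pvMStep key) none
    set m4 := (xs.filter (pvP4 cx cy)).foldl (pvMStep key) none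
    cases m1 <;> cases m2 <;> cases m3 <;> cases m4 <;> simp [pvCollect]
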